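-- pv_equiv track=rewrite | github.com/Aziz-Benamira/TrendScope-AI | producers/reddit/reddit_producer.py | extract_movie_mentions
-- ===== SOURCE A (Python) =====
-- def extract_movie_mentions(text):
--     """Extract potential movie mentions from text"""
--     # Simple heuristic: capitalize words that might be movie titles
--     # This is a basic implementation - can be enhanced with NLP
--     words = text.split()
--     potential_movies = []
--
--     # Look for capitalized phrases (potential movie titles)
--     i = 0
--     while i < len(words):
--         if words[i] and words[i][0].isupper():
--             title = words[i]
--             j = i + 1
--             # Collect consecutive capitalized words
--             while j < len(words) and words[j] and words[j][0].isupper():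
--                 title += " " + words[j]
--                 j += 1
--             if len(title.split()) >= 1:  # At least one word
--                 potential_movies.append(title.strip('.,!?;:'))
--             i = j
--         else:
--             i += 1
--
--     return potential_movies
-- ===== SOURCE B (Python) =====
-- def extract_movie_mentions(text):
--     """Extract potential movie mentions from text"""
--     phrases = []
--     current = []
--     for w in text.split():
--         if w[0].isupper():
--             current.append(w)
--         elif current:
--             phrases.append(current)
--             current = []
--     if current:
--         phrases.append(current)
--     return [' '.join(p).strip('.,!?;:') for p in phrases]
-- ===== Notes on version B (the rewrite author's own statement) =====
-- stated objective: simpler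
-- what changed: Replaces A's index-based two-pointer scan (outer while with an inner while collecting a run and a string accumulator) by a single pass over the words with a current-run list accumulator, flushed into a list of runs, followed by one join/strip comprehension.
import Mathlib
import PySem

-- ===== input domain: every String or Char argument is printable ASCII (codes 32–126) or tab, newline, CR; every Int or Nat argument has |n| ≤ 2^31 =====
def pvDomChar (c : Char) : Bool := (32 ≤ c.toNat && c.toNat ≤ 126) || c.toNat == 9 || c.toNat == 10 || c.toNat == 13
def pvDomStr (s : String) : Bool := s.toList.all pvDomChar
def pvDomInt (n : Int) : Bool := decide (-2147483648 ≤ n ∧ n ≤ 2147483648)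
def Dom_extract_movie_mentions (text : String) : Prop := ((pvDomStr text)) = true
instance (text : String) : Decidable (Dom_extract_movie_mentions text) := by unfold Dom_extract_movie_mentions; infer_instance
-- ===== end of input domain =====

-- B replaces A's index-based two-pointer scan by a single pass with a current-run accumulator plus a join/strip comprehension (objective: simpler).

-- ===== PORT A =====
-- 'words[i] and words[i][0].isupper()' (truthiness of the string, then first char)
def capA (w : String) : Bool :=
  if w = "" then false
  else match PySem.Str.pyGet? w 0 with
       | some c => PySem.Chars.isupper c
       | none => false

-- inner while: collect consecutive capitalized words into 'title', returning it with the rest (j onward)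
def extractACollect (title : String) : List String → String × List String
  | [] => (title, [])
  | w :: ws => if capA w then extractACollect (title ++ " " ++ w) ws else (title, w :: ws)

lemma extractACollect_len : ∀ (ws : List String) (t : String), (extractACollect t ws).2.length ≤ ws.length := by
  intro ws
  induction ws with
  | nil => intro t; simp [extractACollect]
  | cons w ws ih =>
    intro t
    simp only [extractACollect]
    split
    · exact le_trans (ih _) (Nat.le_succ _)
    · simp

-- outer while over the word list (i jumps to j after a run)
def extractALoop : List String → List String
  | [] => []
  | w :: ws =>
    if capA w then
      let p := extractACollect w ws
      (if 1 ≤ (PySem.Str.split₀ p.1).length then [PySem.Str.stripChars p.1 ".,!?;:"] else []) ++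
        extractALoop p.2
    else extractALoop ws
termination_by ws => ws.length
decreasing_by
  · exact Nat.lt_succ_of_le (extractACollect_len _ _)
  · simp

def extract_movie_mentions (text : String) : List String :=
  extractALoop (PySem.Str.split₀ text)

-- ===== PORT B =====
-- 'w[0].isupper()'
def capB (w : String) : Bool :=
  match PySem.Str.pyGet? w 0 with
  | some c => PySem.Chars.isupper c
  | none => false

-- loop body: append to the current run, or flush it
def bStep (st : List (List String) × List String) (w : String) : List (List String) × List String :=
  if capB w then (st.1, st.2 ++ [w])
  else if st.2 ≠ [] then (st.1 ++ [st.2], [])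
  else st

def extract_movie_mentions_alt (text : String) : List String :=
  let st := (PySem.Str.split₀ text).foldl bStep ([], [])
  let phrases := if st.2 ≠ [] then st.1 ++ [st.2] else st.1
  phrases.map (fun p => PySem.Str.stripChars (PySem.Str.join " " p) ".,!?;:")

-- ===== PRECONDITION & SPEC =====
def Spec_extract_movie_mentions (text : String) (out : List String) : Prop := out = extract_movie_mentions_alt text
instance (text : String) (out : List String) : Decidable (Spec_extract_movie_mentions text out) := by unfold Spec_extract_movie_mentions; infer_instance

-- ===== CLAIM (what is proved, stated in full; the proofs are below) =====
def Claim_equal_extract_movie_mentions : Prop := ∀ (text : String), Dom_extract_movie_mentions text → Spec_extract_movie_mentions text (extract_movie_mentions text)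

-- ===== LEMMAS AND PROOFS =====

lemma capB_eq_capA (w : String) : capB w = capA w := by
  unfold capA capB
  by_cases h : w = ""
  · subst h; simp [PySem.Str.pyGet?, PySem.Chars.pyGet?, PySem.List.pyGet?, PySem.List.pyIdx?]
  · simp [h]

-- the common run structure: maximal runs of capitalized words
def runsSpec : List String → List (List String)
  | [] => []
  | w :: ws =>
    if capA w then (w :: ws.takeWhile capA) :: runsSpec (ws.dropWhile capA)
    else runsSpec ws
termination_by ws => ws.length
decreasing_by
  · exact Nat.lt_succ_of_le (List.length_dropWhile_le _ _)
  · simp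

def joinFold (w : String) (ws : List String) : String :=
  ws.foldl (fun a b => a ++ " " ++ b) w

lemma extractACollect_eq (ws : List String) : ∀ t,
    extractACollect t ws = (joinFold t (ws.takeWhile capA), ws.dropWhile capA) := by
  induction ws with
  | nil => intro t; simp [extractACollect, joinFold]
  | cons w ws ih =>
    intro t
    simp only [extractACollect, List.takeWhile, List.dropWhile]
    by_cases h : capA w
    · simp [h, ih, joinFold]
    · simp [h, joinFold]

lemma joinFold_toList (ws : List String) : ∀ w, ∃ t, (joinFold w ws).toList = w.toList ++ t := by
  induction ws with
  | nil => intro w; exact ⟨[], by simp [joinFold]⟩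
  | cons a ws ih =>
    intro w
    obtain ⟨t, ht⟩ := ih (w ++ " " ++ a)
    refine ⟨(" " ++ a).toList ++ t, ?_⟩
    simp only [joinFold, List.foldl_cons] at ht ⊢
    simp [ht]

lemma go_len_ge : ∀ (s cur : List Char) (acc : List (List Char)),
    acc.length ≤ (PySem.Chars.split₀.go s cur acc).length := by
  intro s
  induction s with
  | nil =>
    intro cur acc
    simp only [PySem.Chars.split₀.go]
    split <;> simp
  | cons c s ih =>
    intro cur acc
    simp only [PySem.Chars.split₀.go]
    split
    · split
      · exact ih _ _
      · exact le_trans (by simp) (ih [] (cur.reverse :: acc))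
    · exact ih _ _

lemma go_len_pos : ∀ (s cur : List Char) (acc : List (List Char)), cur ≠ [] →
    acc.length + 1 ≤ (PySem.Chars.split₀.go s cur acc).length := by
  intro s
  induction s with
  | nil =>
    intro cur acc h
    simp only [PySem.Chars.split₀.go]
    rw [if_neg (by simpa using h)]
    simp
  | cons c s ih =>
    intro cur acc h
    simp only [PySem.Chars.split₀.go]
    split
    · rw [if_neg (by simpa using h)]
      exact le_trans (by simp) (go_len_ge s [] (cur.reverse :: acc))
    · exact ih _ _ (by simp)

lemma isupper_not_isspace (c : Char) (h : PySem.Chars.isupper c = true) :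
    PySem.Chars.isspace c = false := by
  unfold PySem.Chars.isupper at h
  unfold PySem.Chars.isspace
  simp only [Bool.and_eq_true, decide_eq_true_eq, Char.le_def, UInt32.le_iff_toNat_le] at h
  have hA : (65:Nat) ≤ c.val.toNat := by simpa using h.1
  have hZ : c.val.toNat ≤ 90 := by simpa using h.2
  simp only [Char.toNat]
  simp only [Bool.or_eq_false_iff, Bool.and_eq_false_iff, decide_eq_false_iff_not]
  omega

lemma capA_head (w : String) (h : capA w = true) :
    ∃ c cs, w.toList = c :: cs ∧ PySem.Chars.isupper c = true := by
  unfold capA at h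
  by_cases hw : w = ""
  · simp [hw] at h
  · rw [if_neg hw] at h
    rcases hl : w.toList with _ | ⟨c, cs⟩
    · exact absurd (by
        have : w = "" := by
          have := congrArg String.ofList hl
          simpa [String.ofList_toList] using this
        exact this) hw
    · refine ⟨c, cs, rfl, ?_⟩
      have hg : PySem.Str.pyGet? w 0 = some c := by
        simp [PySem.Str.pyGet?, PySem.Chars.pyGet?, hl, PySem.List.pyGet?, PySem.List.pyIdx?]
      rw [hg] at h
      exact h

lemma split₀_title_pos (w : String) (ws : List String) (h : capA w = true) :
    1 ≤ (PySem.Str.split₀ (joinFold w ws)).length := by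
  obtain ⟨c, cs, hl, hc⟩ := capA_head w h
  obtain ⟨t, ht⟩ := joinFold_toList ws w
  rw [hl] at ht
  unfold PySem.Str.split₀
  rw [List.length_map]
  unfold PySem.Chars.split₀
  rw [ht]
  simp only [List.cons_append, PySem.Chars.split₀.go, isupper_not_isspace c hc]
  simp only [Bool.false_eq_true, if_false]
  exact go_len_pos _ [c] [] (by simp)

def runOut (r : List String) : String :=
  match r with
  | [] => ""
  | w :: rest => PySem.Str.stripChars (joinFold w rest) ".,!?;:"

lemma extractALoop_eq : ∀ (n : ℕ) (ws : List String), ws.length ≤ n →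
    extractALoop ws = (runsSpec ws).map runOut := by
  intro n
  induction n with
  | zero =>
    intro ws h
    have : ws = [] := List.eq_nil_of_length_eq_zero (Nat.le_zero.mp h)
    subst this
    simp [extractALoop, runsSpec]
  | succ n ih =>
    intro ws h
    match ws with
    | [] => simp [extractALoop, runsSpec]
    | w :: ws =>
      rw [extractALoop, runsSpec]
      by_cases hc : capA w
      · simp only [hc, if_true]
        rw [extractACollect_eq]
        simp only
        rw [if_pos (split₀_title_pos w _ hc)]
        rw [ih (ws.dropWhile capA)
            (le_trans (List.length_dropWhile_le _ _) (Nat.le_of_succ_le_succ h))]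
        simp [runOut]
      · simp only [hc, if_false, Bool.false_eq_true]
        exact ih ws (Nat.le_of_succ_le_succ h)

def bClose (st : List (List String) × List String) : List (List String) :=
  if st.2 ≠ [] then st.1 ++ [st.2] else st.1

lemma bTake : ∀ (ws : List String) (phrases : List (List String)) (cur : List String), cur ≠ [] →
    bClose (ws.foldl bStep (phrases, cur)) =
      bClose ((ws.dropWhile capB).foldl bStep (phrases ++ [cur ++ ws.takeWhile capB], [])) := by
  intro ws
  induction ws with
  | nil =>
    intro phrases cur h
    simp [bClose, h]
  | cons w ws ih =>
    intro phrases cur h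
    simp only [List.foldl_cons, List.takeWhile, List.dropWhile]
    by_cases hc : capB w
    · simp only [hc, bStep, if_true]
      rw [ih phrases (cur ++ [w]) (by simp)]
      simp
    · simp [bStep, hc, h]

lemma bFold_eq : ∀ (n : ℕ) (ws : List String) (phrases : List (List String)), ws.length ≤ n →
    bClose (ws.foldl bStep (phrases, [])) = phrases ++ runsSpec ws := by
  intro n
  induction n with
  | zero =>
    intro ws phrases h
    have : ws = [] := List.eq_nil_of_length_eq_zero (Nat.le_zero.mp h)
    subst this
    simp [bClose, runsSpec]
  | succ n ih =>
    intro ws phrases h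
    match ws with
    | [] => simp [bClose, runsSpec]
    | w :: ws =>
      rw [runsSpec]
      simp only [List.foldl_cons]
      by_cases hc : capA w
      · have hb : capB w = true := by rw [capB_eq_capA]; exact hc
        simp only [bStep, hb, if_true, hc, List.nil_append]
        rw [bTake ws phrases [w] (by simp)]
        rw [funext capB_eq_capA]
        rw [ih (ws.dropWhile capA) _
            (le_trans (List.length_dropWhile_le _ _) (Nat.le_of_succ_le_succ h))]
        simp
      · have hb : capB w = false := by rw [capB_eq_capA]; exact Bool.of_not_eq_true hc
        simp only [hc, Bool.false_eq_true, if_false]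
        have hstep : bStep (phrases, []) w = (phrases, []) := by simp [bStep, hb]
        rw [hstep]
        exact ih ws phrases (Nat.le_of_succ_le_succ h)

lemma join_eq_joinFold : ∀ (rest : List String) (w : String),
    PySem.Str.join " " (w :: rest) = joinFold w rest := by
  intro rest
  induction rest with
  | nil =>
    intro w
    simp [PySem.Str.join, PySem.Chars.join_singleton, String.ofList_toList, joinFold]
  | cons a rest ih =>
    intro w
    have h1 : PySem.Str.join " " (w :: a :: rest) = PySem.Str.join " " ((w ++ " " ++ a) :: rest) := by
      cases rest with
      | nil =>
        simp only [PySem.Str.join, List.map_cons, List.map_nil,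
          PySem.Chars.join_cons_cons, PySem.Chars.join_singleton]
        congr 1
        simp [List.append_assoc]
      | cons b rest =>
        simp only [PySem.Str.join, List.map_cons, PySem.Chars.join_cons_cons]
        congr 1
        simp [List.append_assoc]
    rw [h1, ih]
    simp only [joinFold, List.foldl_cons]

lemma runsSpec_ne_nil : ∀ (n : ℕ) (ws : List String), ws.length ≤ n →
    ∀ r ∈ runsSpec ws, ∃ w rest, r = w :: rest := by
  intro n
  induction n with
  | zero =>
    intro ws h
    have : ws = [] := List.eq_nil_of_length_eq_zero (Nat.le_zero.mp h)
    subst this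
    simp [runsSpec]
  | succ n ih =>
    intro ws h r hr
    match ws with
    | [] => simp [runsSpec] at hr
    | w :: ws =>
      rw [runsSpec] at hr
      by_cases hc : capA w
      · simp only [hc, if_true, List.mem_cons] at hr
        rcases hr with hr | hr
        · exact ⟨w, ws.takeWhile capA, hr⟩
        · exact ih (ws.dropWhile capA)
            (le_trans (List.length_dropWhile_le _ _) (Nat.le_of_succ_le_succ h)) r hr
      · simp only [hc, Bool.false_eq_true, if_false] at hr
        exact ih ws (Nat.le_of_succ_le_succ h) r hr

-- ===== VERDICT (by name: the statement is the Claim_ definition above) =====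
theorem extract_movie_mentions_spec : Claim_equal_extract_movie_mentions := by
  intro text _
  unfold Spec_extract_movie_mentions extract_movie_mentions extract_movie_mentions_alt
  set ws := PySem.Str.split₀ text with hws
  simp only
  rw [show (if (ws.foldl bStep ([], [])).2 ≠ [] then (ws.foldl bStep ([], [])).1 ++ [(ws.foldl bStep ([], [])).2] else (ws.foldl bStep ([], [])).1) = bClose (ws.foldl bStep ([], [])) from rfl]
  rw [bFold_eq ws.length ws [] le_rfl]
  rw [extractALoop_eq ws.length ws le_rfl]
  simp only [List.nil_append]
  apply List.map_congr_left
  intro r hr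
  obtain ⟨w, rest, rfl⟩ := runsSpec_ne_nil ws.length ws le_rfl r hr
  simp [runOut, join_eq_joinFold]
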